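-- pv_equiv track=rewrite | github.com/KeatonMacLeod/DataminingProject | Nadege/fpgrowth.py | len_counts
-- ===== SOURCE A (Python) =====
-- def len_counts(patterns):
--     lens = {}
--     for p in patterns:
--         if len(p) not in lens.keys():
--             lens[len(p)] = 1
--         else:
--             lens[len(p)] += 1
--     return lens
-- ===== SOURCE B (Python) =====
-- def len_counts(patterns):
--     lengths = [len(p) for p in patterns]
--     return {n: lengths.count(n) for n in dict.fromkeys(lengths)}
-- ===== Notes on version B (the rewrite author's own statement) =====
-- stated objective: simpler
-- what changed: Replaces the one-pass dict-increment loop with a two-pass comprehension: collect the lengths, dedup them in first-appearance order, and map each distinct length to lengths.count(n).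
import Mathlib
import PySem

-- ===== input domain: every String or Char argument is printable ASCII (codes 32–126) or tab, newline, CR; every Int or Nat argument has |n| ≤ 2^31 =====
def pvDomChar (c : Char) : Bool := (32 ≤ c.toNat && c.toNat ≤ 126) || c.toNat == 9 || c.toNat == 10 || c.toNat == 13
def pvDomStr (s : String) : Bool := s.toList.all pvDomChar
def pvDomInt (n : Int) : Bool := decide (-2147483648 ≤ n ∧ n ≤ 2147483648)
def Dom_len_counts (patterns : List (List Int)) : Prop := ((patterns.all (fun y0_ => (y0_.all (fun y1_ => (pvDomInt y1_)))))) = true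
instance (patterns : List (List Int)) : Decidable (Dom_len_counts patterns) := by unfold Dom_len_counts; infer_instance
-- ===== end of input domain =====

-- B replaces A's one-pass dict-increment loop with dedup-the-lengths + count-each (simpler, two passes).


-- ===== PORT A =====
def len_counts (patterns : List (List Int)) : List (Int × Int) :=
  (patterns.foldl (fun lens p =>
    if (PySem.Dict.keys lens).contains ((p.length : Int)) = false then
      PySem.Dict.insert lens (p.length : Int) 1
    else
      PySem.Dict.insert lens (p.length : Int) (PySem.Dict.getD lens (p.length : Int) 0 + 1))
    PySem.Dict.empty).items

-- ===== PORT B =====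
def len_counts_alt (patterns : List (List Int)) : List (Int × Int) :=
  let lengths := patterns.map (fun p => (p.length : Int))
  (PySem.List.dedup lengths).map (fun n => (n, (lengths.count n : Int)))

-- ===== PRECONDITION & SPEC =====
def Spec_len_counts (patterns : List (List Int)) (out : List (Int × Int)) : Prop := out = len_counts_alt patterns
instance (patterns : List (List Int)) (out : List (Int × Int)) : Decidable (Spec_len_counts patterns out) := by unfold Spec_len_counts; infer_instance

-- ===== CLAIM (what is proved, stated in full; the proofs are below) =====
def Claim_equal_len_counts : Prop := ∀ (patterns : List (List Int)), Dom_len_counts patterns → Spec_len_counts patterns (len_counts patterns)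

-- ===== LEMMAS AND PROOFS =====
-- A's loop step (insert 1 when absent, insert getD+1 when present) is the counter step.
theorem len_counts_step (lens : PySem.Dict Int Int) (k : Int) :
    (if (PySem.Dict.keys lens).contains k = false then
      PySem.Dict.insert lens k 1
    else
      PySem.Dict.insert lens k (PySem.Dict.getD lens k 0 + 1))
    = PySem.Dict.insert lens k (PySem.Dict.getD lens k 0 + 1) := by
  split_ifs with h
  · rw [PySem.Dict.getD_of_not_contains lens 0
      (by rw [PySem.Dict.contains_eq_decide_mem_keys]; simpa using h), show (0:Int)+1 = 1 by ring]
  · rfl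

theorem len_counts_fold (patterns : List (List Int)) :
    len_counts patterns = (PySem.Dict.counter (patterns.map (fun p => (p.length : Int)))).items := by
  unfold len_counts
  rw [← PySem.Dict.foldl_insert_getD_add_one_eq_counter, List.foldl_map]
  refine congrArg PySem.Dict.items ?_
  apply PySem.List.foldl_congr_mem
  intro acc x _
  exact len_counts_step acc (x.length : Int)

-- ===== VERDICT (by name: the statement is the Claim_ definition above) =====
theorem len_counts_spec : Claim_equal_len_counts := by
  intro patterns _
  unfold Spec_len_counts len_counts_alt
  rw [len_counts_fold, PySem.Dict.items_counter]
  simp [PySem.List.dedup_eq_ofList]
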